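-- pv_equiv track=rewrite | github.com/parth-shinge/Prompt.Ai | ranker.py | _compute_safe_cv
-- ===== SOURCE A (Python) =====
-- from typing import List, Tuple, Dict, Any, Union
--
-- def _compute_safe_cv(labels: List[str], requested_cv: int) -> int:
--     n_samples = len(labels)
--     class_counts = [labels.count(c) for c in set(labels)]
--     min_per_class = min(class_counts) if class_counts else 0
--     # Need at least 2 folds, each fold must contain at least 1 sample from every class
--     max_cv = min(n_samples, min_per_class) if min_per_class > 0 else 0
--     if max_cv < 2:
--         return 0  # indicates CV not feasible
--     return max(2, min(requested_cv, max_cv))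
-- ===== SOURCE B (Python) =====
-- from typing import List
--
-- def _compute_safe_cv(labels: List[str], requested_cv: int) -> int:
--     # Sort a copy, then one run-length scan over equal runs gives the
--     # smallest class size without any per-class rescans or hashing.
--     s = sorted(labels)
--     n = len(s)
--     min_run = 0
--     i = 0
--     while i < n:
--         j = i + 1
--         while j < n and s[j] == s[i]:
--             j += 1
--         run = j - i
--         if min_run == 0 or run < min_run:
--             min_run = run
--         i = j
--     max_cv = min(n, min_run) if min_run > 0 else 0
--     if max_cv < 2:
--         return 0
--     return max(2, min(requested_cv, max_cv))
-- ===== Notes on version B (the rewrite author's own statement) =====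
-- stated objective: faster
-- what changed: Replaces A's set-comprehension that rescans the whole list with labels.count for every distinct label by a sort of a copy followed by a single run-length scan that keeps the minimum run length.
import Mathlib
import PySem

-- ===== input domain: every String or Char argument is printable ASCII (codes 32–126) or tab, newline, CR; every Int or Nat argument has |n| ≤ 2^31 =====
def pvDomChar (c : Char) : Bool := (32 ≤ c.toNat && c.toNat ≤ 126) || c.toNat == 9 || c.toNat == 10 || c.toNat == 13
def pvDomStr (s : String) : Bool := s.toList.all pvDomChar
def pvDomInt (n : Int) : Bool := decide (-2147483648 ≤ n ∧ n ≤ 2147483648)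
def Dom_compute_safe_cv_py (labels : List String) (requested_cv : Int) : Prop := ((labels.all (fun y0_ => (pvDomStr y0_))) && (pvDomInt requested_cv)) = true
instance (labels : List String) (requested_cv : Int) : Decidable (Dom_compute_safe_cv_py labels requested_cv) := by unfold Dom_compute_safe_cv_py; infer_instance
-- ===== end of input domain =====

-- B sorts a copy of the labels and finds the smallest class size by one run-length
-- scan over the sorted list, instead of A's per-distinct-label labels.count rescan;
-- the return value is identical (objective: faster — O(n log n) vs A's O(n·k), confirmed).

-- ===== PORT A =====
def compute_safe_cv_py (labels : List String) (requested_cv : Int) : Int :=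
  let n_samples : Int := labels.length
  let class_counts : List Int :=
    (PySem.Set.ofList labels).map (fun c => (PySem.List.count labels c : Int))
  let min_per_class : Int :=
    match PySem.List.min? class_counts (fun x => x) with
    | some m => m
    | none => 0
  let max_cv : Int := if min_per_class > 0 then min n_samples min_per_class else 0
  if max_cv < 2 then 0 else max 2 (min requested_cv max_cv)

-- ===== PORT B =====
-- the outer while loop of Source B: each step consumes one run (the inner while loop
-- is the takeWhile/dropWhile split of the first run) and updates the running minimum
def pvMinRunLoop : List String → Int → Int
  | [], minRun => minRun
  | a :: rest, minRun =>
    let run : Int := 1 + ((rest.takeWhile (fun x => x == a)).length : Int)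
    pvMinRunLoop (rest.dropWhile (fun x => x == a))
      (if minRun = 0 ∨ run < minRun then run else minRun)
termination_by l _ => l.length
decreasing_by
  have := (List.dropWhile_sublist (p := fun x => x == a) (l := rest)).length_le
  simp; omega

def compute_safe_cv_py_alt (labels : List String) (requested_cv : Int) : Int :=
  let s := PySem.List.sorted labels (fun x => x) false
  let n : Int := s.length
  let min_run : Int := pvMinRunLoop s 0
  let max_cv : Int := if min_run > 0 then min n min_run else 0
  if max_cv < 2 then 0 else max 2 (min requested_cv max_cv)

-- ===== PRECONDITION & SPEC =====
def Spec_compute_safe_cv_py (labels : List String) (requested_cv : Int) (out : Int) : Prop := out = compute_safe_cv_py_alt labels requested_cv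
instance (labels : List String) (requested_cv : Int) (out : Int) : Decidable (Spec_compute_safe_cv_py labels requested_cv out) := by unfold Spec_compute_safe_cv_py; infer_instance

-- ===== CLAIM (what is proved, stated in full; the proofs are below) =====
def Claim_equal_compute_safe_cv_py : Prop := ∀ (labels : List String) (requested_cv : Int), Dom_compute_safe_cv_py labels requested_cv → Spec_compute_safe_cv_py labels requested_cv (compute_safe_cv_py labels requested_cv)

-- ===== LEMMAS AND PROOFS =====

-- proof-only helper: merging an accumulated minimum (0 = "none yet") with an optional minimum
def pvCombine (acc : Int) (o : Option Int) : Int :=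
  match o with
  | none => acc
  | some m => if acc = 0 then m else min acc m

theorem pv_min?_nil : PySem.List.min? ([] : List Int) (fun x => x) = none :=
  (PySem.List.min?_eq_none_iff _ _).mpr rfl

theorem pv_foldl_min_left (l : List Int) (a b : Int) :
    l.foldl min (min a b) = min a (l.foldl min b) := by
  induction l generalizing b with
  | nil => simp
  | cons x t ih => simpa [min_assoc] using ih (min b x)

theorem pv_combine_step (acc run : Int) (L : List Int) (hrun : 1 ≤ run) :
    pvCombine acc (PySem.List.min? (run :: L) (fun x => x))
      = pvCombine (if acc = 0 ∨ run < acc then run else acc)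
          (PySem.List.min? L (fun x => x)) := by
  cases L with
  | nil =>
    rw [PySem.List.min?_id_cons, pv_min?_nil]
    simp only [pvCombine, List.foldl_nil]
    split_ifs <;> omega
  | cons y L' =>
    rw [PySem.List.min?_id_cons, PySem.List.min?_id_cons]
    simp only [List.foldl_cons, pvCombine]
    rw [pv_foldl_min_left]
    split_ifs <;> omega

-- elements all equal to the accumulator's sole element are absorbed by Set.add
theorem pv_foldl_add_const (t : List String) (a : String) (h : ∀ x ∈ t, x = a) :
    t.foldl PySem.Set.add [a] = [a] := by
  induction t with
  | nil => rfl
  | cons x t ih =>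
    have hx := h x (by simp)
    subst hx
    simp only [List.foldl_cons]
    have : PySem.Set.add [x] x = [x] := by simp [PySem.Set.add, PySem.Set.contains]
    rw [this]
    exact ih (fun y hy => h y (by simp [hy]))

theorem pv_foldl_add_cons (d : List String) (a : String) (s : List String)
    (h : ∀ x ∈ d, x ≠ a) :
    d.foldl PySem.Set.add (a :: s) = a :: d.foldl PySem.Set.add s := by
  induction d generalizing s with
  | nil => rfl
  | cons x d' ih =>
    have hx : x ≠ a := h x (by simp)
    simp only [List.foldl_cons]
    have : PySem.Set.add (a :: s) x = a :: PySem.Set.add s x := by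
      simp only [PySem.Set.add, PySem.Set.contains]
      simp [hx]
      split_ifs <;> rfl
    rw [this]
    exact ih _ (fun y hy => h y (by simp [hy]))

-- min over a list of Ints (first extremal element) depends only on the multiset
theorem pv_min?_id_perm (l l' : List Int) (h : l.Perm l') :
    PySem.List.min? l (fun x => x) = PySem.List.min? l' (fun x => x) := by
  cases hl : PySem.List.min? l (fun x => x) with
  | none =>
    rw [PySem.List.min?_eq_none_iff] at hl
    subst hl
    rw [h.symm.eq_nil, pv_min?_nil]
  | some m =>
    cases hl' : PySem.List.min? l' (fun x => x) with
    | none =>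
      rw [PySem.List.min?_eq_none_iff] at hl'
      subst hl'
      rw [h.eq_nil] at hl
      rw [pv_min?_nil] at hl
      cases hl
    | some m' =>
      have hm := PySem.List.min?_mem hl
      have hm' := PySem.List.min?_mem hl'
      have h1 : m ≤ m' := PySem.List.min?_isMin hl m' (h.symm.mem_iff.mp hm')
      have h2 : m' ≤ m := PySem.List.min?_isMin hl' m (h.mem_iff.mp hm)
      exact congrArg some (le_antisymm h1 h2)

-- the run-length loop over a sorted list computes A's min-of-class-counts
theorem pv_minRunLoop_eq (N : Nat) :
    ∀ (s : List String), s.length ≤ N → s.Pairwise (· ≤ ·) → ∀ acc : Int, 0 ≤ acc →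
    pvMinRunLoop s acc
      = pvCombine acc (PySem.List.min?
          ((PySem.Set.ofList s).map (fun c => (PySem.List.count s c : Int))) (fun x => x)) := by
  induction N with
  | zero =>
    intro s hlen _ acc _
    have hnil : s = [] := by cases s <;> simp_all
    subst hnil
    simp [pvMinRunLoop, pvCombine, PySem.Set.ofList, pv_min?_nil]
  | succ N ih =>
    intro s hlen hs acc hacc
    cases s with
    | nil => simp [pvMinRunLoop, pvCombine, PySem.Set.ofList, pv_min?_nil]
    | cons a rest =>
      set t := rest.takeWhile (fun x => x == a) with ht_def
      set d := rest.dropWhile (fun x => x == a) with hd_def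
      have hrest : t ++ d = rest := List.takeWhile_append_dropWhile
      have ht : ∀ x ∈ t, x = a := by
        intro x hx
        have := List.mem_takeWhile_imp hx
        simpa using this
      have hpc := List.pairwise_cons.mp hs
      have hd_sub : d.Sublist rest := List.dropWhile_sublist _
      have hd_sorted : d.Pairwise (· ≤ ·) := hpc.2.sublist hd_sub
      have hd_ne : ∀ x ∈ d, x ≠ a := by
        cases hd : d with
        | nil => simp
        | cons h0 d' =>
          have hne : rest.dropWhile (fun x => x == a) ≠ [] := by rw [← hd_def, hd]; simp
          have hh0 := List.head_dropWhile_not (p := fun x => x == a) (l := rest) hne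
          simp only [← hd_def, hd, List.head_cons, beq_eq_false_iff_ne, ne_eq] at hh0
          have hh0r : h0 ∈ rest := hd_sub.mem (by rw [hd]; simp)
          have hah0 : a < h0 := lt_of_le_of_ne (hpc.1 h0 hh0r) (Ne.symm hh0)
          have hd_sorted' := hd_sorted
          rw [hd] at hd_sorted'
          intro x hx
          rcases List.mem_cons.mp hx with rfl | hx'
          · exact hh0
          · have hx2 : h0 ≤ x := (List.pairwise_cons.mp hd_sorted').1 x hx'
            intro he
            rw [he] at hx2
            exact absurd (lt_of_lt_of_le hah0 hx2) (lt_irrefl a)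
      -- class counts along the first-run decomposition
      have htcount : List.count a t = t.length := List.count_eq_length.mpr (fun b hb => (ht b hb).symm)
      have hdcount : List.count a d = 0 := List.count_eq_zero.mpr (fun hmem => hd_ne a hmem rfl)
      have hc_a : (PySem.List.count (a :: rest) a : Int) = 1 + ((t.length : Nat) : Int) := by
        rw [PySem.List.count_eq, List.count_cons_self, ← hrest, List.count_append, htcount, hdcount]
        push_cast; ring
      have hc_rest : ∀ c ∈ PySem.Set.ofList d,
          (PySem.List.count (a :: rest) c : Int) = (PySem.List.count d c : Int) := by
        intro c hc
        have hcd : c ∈ d := (PySem.Set.mem_ofList d c).mp hc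
        have hca : c ≠ a := hd_ne c hcd
        have hct : List.count c t = 0 := List.count_eq_zero.mpr (fun hmem => hca (ht c hmem))
        rw [PySem.List.count_eq, PySem.List.count_eq,
            List.count_cons_of_ne (Ne.symm hca), ← hrest, List.count_append, hct]
        simp
      have hset : PySem.Set.ofList (a :: rest) = a :: PySem.Set.ofList d := by
        show (a :: rest).foldl PySem.Set.add [] = _
        rw [List.foldl_cons]
        have hadd : PySem.Set.add ([] : List String) a = [a] := rfl
        rw [hadd, ← hrest, List.foldl_append, pv_foldl_add_const t a ht,
            pv_foldl_add_cons d a [] hd_ne]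
        rfl
      -- one step of the loop, then the inductive hypothesis on the tail
      have hlen' : d.length ≤ N := by
        have h1 := hd_sub.length_le
        simp only [List.length_cons] at hlen
        omega
      have hrun1 : (1 : Int) ≤ 1 + ((t.length : Nat) : Int) := by omega
      have hstep : 0 ≤ (if acc = 0 ∨ 1 + ((t.length : Nat) : Int) < acc
          then 1 + ((t.length : Nat) : Int) else acc) := by
        split_ifs <;> omega
      rw [show pvMinRunLoop (a :: rest) acc
            = pvMinRunLoop d (if acc = 0 ∨ 1 + ((t.length : Nat) : Int) < acc
                then 1 + ((t.length : Nat) : Int) else acc) from by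
            rw [pvMinRunLoop]]
      rw [ih d hlen' hd_sorted _ hstep]
      rw [hset, List.map_cons, List.map_congr_left hc_rest, hc_a]
      exact (pv_combine_step acc _ _ hrun1).symm

-- ===== VERDICT (by name: the statement is the Claim_ definition above) =====
theorem compute_safe_cv_py_spec : Claim_equal_compute_safe_cv_py := by
  intro labels requested_cv _
  show compute_safe_cv_py labels requested_cv = compute_safe_cv_py_alt labels requested_cv
  unfold compute_safe_cv_py compute_safe_cv_py_alt
  set s := PySem.List.sorted labels (fun x => x) false with hs_def
  have hperm : s.Perm labels := PySem.List.sorted_perm labels (fun x => x) false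
  have hpair : s.Pairwise (· ≤ ·) := by
    have := PySem.List.sorted_pairwise labels (fun x => x)
    simpa using this
  have hmr := pv_minRunLoop_eq s.length s le_rfl hpair 0 le_rfl
  have hcnt : ∀ c, (PySem.List.count s c : Int) = (PySem.List.count labels c : Int) := by
    intro c
    rw [PySem.List.count_eq, PySem.List.count_eq, hperm.count_eq]
  have hsets : (PySem.Set.ofList s).Perm (PySem.Set.ofList labels) := by
    refine (List.perm_ext_iff_of_nodup (PySem.Set.nodup_ofList s) (PySem.Set.nodup_ofList labels)).mpr ?_
    intro x
    rw [PySem.Set.mem_ofList, PySem.Set.mem_ofList, hperm.mem_iff]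
  have hmap : ((PySem.Set.ofList s).map (fun c => (PySem.List.count s c : Int))).Perm
      ((PySem.Set.ofList labels).map (fun c => (PySem.List.count labels c : Int))) := by
    rw [List.map_congr_left (fun c _ => hcnt c)]
    exact hsets.map _
  have hmin := pv_min?_id_perm _ _ hmap
  have hlen : ((s.length : Nat) : Int) = ((labels.length : Nat) : Int) := by
    rw [PySem.List.length_sorted]
  simp only [hmr, hmin, hlen]
  cases ho : PySem.List.min?
      ((PySem.Set.ofList labels).map (fun c => (PySem.List.count labels c : Int))) (fun x => x) with
  | none => simp [pvCombine]
  | some m => simp [pvCombine]
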